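-- pv_equiv track=rewrite | github.com/shaneholloman/huggingface-ai-trainer | src/autotrain/rendering/utils.py | fix_message_alternation
-- ===== SOURCE A (Python) =====
-- from typing import Any, Dict, List, Optional, Union
--
-- def fix_message_alternation(messages: List[Dict[str, str]]) -> List[Dict[str, str]]:
--     """Fix messages to ensure proper user/assistant alternation.
--
--     This handles:
--     1. Consecutive same-role messages (merge them)
--     2. System → assistant without user in between (insert placeholder user)
--     3. Assistant at start without preceding user (insert placeholder user)
--
--     Args:
--         messages: List of message dicts with 'role' and 'content' keys
--
--     Returns:
--         Fixed messages with proper alternation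
--     """
--     if not messages:
--         return messages
--
--     # Step 1: Merge consecutive same-role messages
--     merged = []
--     for msg in messages:
--         role = msg.get("role", "user")
--         content = msg.get("content") or ""
--
--         if merged and merged[-1]["role"] == role:
--             # Merge content with newline separator
--             merged[-1]["content"] = f"{merged[-1]['content']}\n{content}"
--         else:
--             merged.append({"role": role, "content": content})
--
--     # Step 2: Handle alternation issues
--     result = []
--     for msg in merged:
--         role = msg["role"]
--
--         if role == "system":
--             result.append(msg)
--         elif role == "assistant":
--             # Check if we need to insert a user message before assistant
--             if not result or result[-1]["role"] in ("system", "assistant"):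
--                 # Assistant without preceding user - insert placeholder
--                 result.append({"role": "user", "content": "[Continued]"})
--             result.append(msg)
--         elif role == "user":
--             # Check for consecutive users (shouldn't happen after merge, but safety)
--             if result and result[-1]["role"] == "user":
--                 result[-1]["content"] = f"{result[-1]['content']}\n{msg['content']}"
--             else:
--                 result.append(msg)
--         else:
--             # Unknown role - just append
--             result.append(msg)
--
--     return result
-- ===== SOURCE B (Python) =====
-- from itertools import groupby
--
--
-- def fix_message_alternation(messages):
--     """Single pass over runs: group consecutive same-role messages with
--     itertools.groupby, join each run's contents, and insert a '[Continued]'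
--     user placeholder before an assistant run that has no user before it."""
--     if not messages:
--         return messages
--
--     result = []
--     prev_role = None
--     for role, run in groupby(messages, key=lambda m: m.get("role", "user")):
--         content = "\n".join(m.get("content") or "" for m in run)
--         if role == "assistant" and prev_role in (None, "system"):
--             result.append({"role": "user", "content": "[Continued]"})
--         result.append({"role": role, "content": content})
--         prev_role = role
--     return result
-- ===== Notes on version B (the rewrite author's own statement) =====
-- stated objective: alternative
-- what changed: B replaces A's two sequential passes (merge consecutive roles into a list, then re-scan that list fixing alternation) by a single traversal over role-runs via itertools.groupby, joining each run's contents at once and tracking only the previous run's role to decide placeholder insertion; A's dead consecutive-user merge branch disappears.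
import Mathlib
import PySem

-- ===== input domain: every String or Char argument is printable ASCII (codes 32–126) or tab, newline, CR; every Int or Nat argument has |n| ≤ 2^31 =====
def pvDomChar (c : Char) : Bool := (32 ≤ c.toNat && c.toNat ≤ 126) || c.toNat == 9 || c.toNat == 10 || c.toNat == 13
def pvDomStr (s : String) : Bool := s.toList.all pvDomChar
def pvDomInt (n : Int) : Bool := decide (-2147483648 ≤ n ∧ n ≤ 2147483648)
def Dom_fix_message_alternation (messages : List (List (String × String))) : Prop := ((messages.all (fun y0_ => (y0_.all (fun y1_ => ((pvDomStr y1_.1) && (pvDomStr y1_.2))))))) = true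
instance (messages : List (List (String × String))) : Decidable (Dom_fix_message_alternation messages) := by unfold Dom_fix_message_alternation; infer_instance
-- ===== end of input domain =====

-- B restructures A's two passes into a single traversal over role-runs (groupby);
-- objective: alternative decomposition, same asymptotic cost.

-- A-side dict primitives.
-- dict lookup: first match in the association list.
def pvGetA? (d : List (String × String)) (k : String) : Option String :=
  match d with
  | [] => none
  | (k', v) :: rest => if k' = k then some v else pvGetA? rest k

-- msg.get("role", "user")
def pvRoleA (msg : List (String × String)) : String :=
  (pvGetA? msg "role").getD "user"

-- msg.get("content") or ""   (contents are strings: falsy = "")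
def pvContentA (msg : List (String × String)) : String :=
  match pvGetA? msg "content" with
  | some c => if c ≠ "" then c else ""
  | none => ""

-- ===== PORT A =====
-- d[k] = v : overwrite in place (key always present where A uses it)
def pvSetA (d : List (String × String)) (k v : String) : List (String × String) :=
  match d with
  | [] => [(k, v)]
  | (k', v') :: rest => if k' = k then (k, v) :: rest else (k', v') :: pvSetA rest k v

-- step 1 loop body: merge consecutive same-role messages
def pvStep1 (merged : List (List (String × String))) (msg : List (String × String)) :
    List (List (String × String)) :=
  let role := pvRoleA msg
  let content := pvContentA msg
  match merged.getLast? with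
  | some last =>
    if (pvGetA? last "role").getD "" = role then
      merged.dropLast ++
        [pvSetA last "content" (((pvGetA? last "content").getD "") ++ "\n" ++ content)]
    else
      merged ++ [[("role", role), ("content", content)]]
  | none => merged ++ [[("role", role), ("content", content)]]

-- step 2 loop body: fix alternation
def pvStep2 (result : List (List (String × String))) (msg : List (String × String)) :
    List (List (String × String)) :=
  let role := (pvGetA? msg "role").getD ""
  if role = "system" then
    result ++ [msg]
  else if role = "assistant" then
    match result.getLast? with
    | none => result ++ [[("role", "user"), ("content", "[Continued]")], msg]
    | some last =>
      if (pvGetA? last "role").getD "" = "system" ∨ (pvGetA? last "role").getD "" = "assistant" then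
        result ++ [[("role", "user"), ("content", "[Continued]")], msg]
      else
        result ++ [msg]
  else if role = "user" then
    match result.getLast? with
    | some last =>
      if (pvGetA? last "role").getD "" = "user" then
        result.dropLast ++
          [pvSetA last "content"
            (((pvGetA? last "content").getD "") ++ "\n" ++ ((pvGetA? msg "content").getD ""))]
      else result ++ [msg]
    | none => result ++ [msg]
  else
    result ++ [msg]

def fix_message_alternation (messages : List (List (String × String))) :
    List (List (String × String)) :=
  match messages with
  | [] => messages
  | _ => (messages.foldl pvStep1 []).foldl pvStep2 []

-- ===== PORT B =====
-- B-side copies of the dict primitives (ports may not share definitions)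
def pvGetB? (d : List (String × String)) (k : String) : Option String :=
  match d with
  | [] => none
  | (k', v) :: rest => if k' = k then some v else pvGetB? rest k

-- msg.get("role", "user")
def pvRoleB (msg : List (String × String)) : String :=
  (pvGetB? msg "role").getD "user"

-- msg.get("content") or ""   (contents are strings: falsy = "")
def pvContentB (msg : List (String × String)) : String :=
  match pvGetB? msg "content" with
  | some c => if c ≠ "" then c else ""
  | none => ""

-- itertools.groupby(messages, key=role), each group reduced to its list of contents
def pvRuns (messages : List (List (String × String))) : List (String × List String) :=
  match messages with
  | [] => []
  | m :: ms =>
    match pvRuns ms with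
    | (r', g) :: rest =>
      if r' = pvRoleB m then (pvRoleB m, pvContentB m :: g) :: rest
      else (pvRoleB m, [pvContentB m]) :: (r', g) :: rest
    | [] => [(pvRoleB m, [pvContentB m])]

-- loop body of B: emit one run, tracking the previous run's role
def pvEmit (st : List (List (String × String)) × Option String) (g : String × List String) :
    List (List (String × String)) × Option String :=
  let content := PySem.Str.join "\n" g.2
  let result :=
    if g.1 = "assistant" ∧ (st.2 = none ∨ st.2 = some "system") then
      st.1 ++ [[("role", "user"), ("content", "[Continued]")]]
    else st.1
  (result ++ [[("role", g.1), ("content", content)]], some g.1)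

def fix_message_alternation_alt (messages : List (List (String × String))) :
    List (List (String × String)) :=
  match messages with
  | [] => []
  | m :: ms => ((pvRuns (m :: ms)).foldl pvEmit ([], none)).1

-- ===== PRECONDITION & SPEC =====
def Spec_fix_message_alternation (messages : List (List (String × String))) (out : List (List (String × String))) : Prop := out = fix_message_alternation_alt messages
instance (messages : List (List (String × String))) (out : List (List (String × String))) : Decidable (Spec_fix_message_alternation messages out) := by unfold Spec_fix_message_alternation; infer_instance

-- ===== CLAIM (what is proved, stated in full; the proofs are below) =====
def Claim_equal_fix_message_alternation : Prop := ∀ (messages : List (List (String × String))), Dom_fix_message_alternation messages → Spec_fix_message_alternation messages (fix_message_alternation messages)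

-- ===== LEMMAS AND PROOFS =====

-- a merged block, as A's pass 1 builds it
def pvBlk (r c : String) : List (String × String) := [("role", r), ("content", c)]

-- runs with an explicit pending group, processed front to back
def pvSpecRuns (r : String) (cs : List String) : List (List (String × String)) → List (String × List String)
  | [] => [(r, cs)]
  | m :: ms =>
    if pvRoleA m = r then pvSpecRuns r (cs ++ [pvContentA m]) ms
    else (r, cs) :: pvSpecRuns (pvRoleA m) [pvContentA m] ms

-- merged blocks with an explicit pending block, contents appended as A does
def pvSpecBlocks (r c : String) : List (List (String × String)) → List (List (String × String))
  | [] => [pvBlk r c]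
  | m :: ms =>
    if pvRoleA m = r then pvSpecBlocks r (c ++ "\n" ++ pvContentA m) ms
    else pvBlk r c :: pvSpecBlocks (pvRoleA m) (pvContentA m) ms

-- prepend a pending group onto an already-grouped list, merging with its head run
def pvMerge (r : String) (cs : List String) (G : List (String × List String)) :
    List (String × List String) :=
  match G with
  | [] => [(r, cs)]
  | (r', g) :: rest => if r' = r then (r, cs ++ g) :: rest else (r, cs) :: (r', g) :: rest

-- adjacent run roles are distinct, and the first differs from `prev`
def pvChain : Option String → List (String × List String) → Prop
  | _, [] => True
  | prev, (r, _) :: gs => prev ≠ some r ∧ pvChain (some r) gs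

-- `prev` is the role of the last block of `result` (none iff empty)
def pvLastOk (result : List (List (String × String))) (prev : Option String) : Prop :=
  result.getLast?.map (fun last => (pvGetA? last "role").getD "") = prev

theorem pvGet_eq (d : List (String × String)) (k : String) : pvGetB? d k = pvGetA? d k := by
  induction d with
  | nil => rfl
  | cons p rest ih => simp [pvGetA?, pvGetB?, ih]

theorem pvRole_eq (m : List (String × String)) : pvRoleB m = pvRoleA m := by
  simp [pvRoleA, pvRoleB, pvGet_eq]

theorem pvContent_eq (m : List (String × String)) : pvContentB m = pvContentA m := by
  simp [pvContentA, pvContentB, pvGet_eq]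

theorem pvRuns_is_merge (m : List (String × String)) (ms : List (List (String × String))) :
    pvRuns (m :: ms) = pvMerge (pvRoleA m) [pvContentA m] (pvRuns ms) := by
  rcases h : pvRuns ms with _ | ⟨⟨r', g⟩, rest⟩ <;>
    simp [pvRuns, pvMerge, h, pvRole_eq, pvContent_eq]

theorem pvRuns_spec (ms : List (List (String × String))) (r : String) (cs : List String) :
    pvSpecRuns r cs ms = pvMerge r cs (pvRuns ms) := by
  induction ms generalizing r cs with
  | nil => rfl
  | cons m ms ih =>
    rw [pvRuns_is_merge]
    simp only [pvSpecRuns]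
    by_cases h : pvRoleA m = r
    · rw [if_pos h, ih]
      rcases pvRuns ms with _ | ⟨⟨r'', g⟩, rest⟩
      · simp [pvMerge, h]
      · by_cases h2 : r'' = r <;> simp [pvMerge, h, h2]
    · rw [if_neg h, ih]
      rcases pvRuns ms with _ | ⟨⟨r'', g⟩, rest⟩
      · simp [pvMerge, h]
      · by_cases h2 : r'' = pvRoleA m <;> simp [pvMerge, h, h2]

theorem pvRuns_cons (m : List (String × String)) (ms : List (List (String × String))) :
    pvRuns (m :: ms) = pvSpecRuns (pvRoleA m) [pvContentA m] ms := by
  rw [pvRuns_is_merge, pvRuns_spec]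

theorem pvPass1_spec (ms : List (List (String × String))) (r c : String)
    (L : List (List (String × String))) :
    List.foldl pvStep1 (L ++ [pvBlk r c]) ms = L ++ pvSpecBlocks r c ms := by
  induction ms generalizing r c L with
  | nil => simp [pvSpecBlocks]
  | cons m ms ih =>
    rw [List.foldl_cons]
    simp only [pvSpecBlocks]
    by_cases h : pvRoleA m = r
    · rw [if_pos h]
      have hstep : pvStep1 (L ++ [pvBlk r c]) m = L ++ [pvBlk r (c ++ "\n" ++ pvContentA m)] := by
        simp [pvStep1, pvBlk, pvGetA?, pvSetA, h]
      rw [hstep, ih]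
    · rw [if_neg h]
      have h' : ¬r = pvRoleA m := fun e => h e.symm
      have hstep : pvStep1 (L ++ [pvBlk r c]) m
          = (L ++ [pvBlk r c]) ++ [pvBlk (pvRoleA m) (pvContentA m)] := by
        simp [pvStep1, pvBlk, pvGetA?, h']
      rw [hstep, ih]
      simp

theorem pvJoin_singleton (c : String) : PySem.Str.join "\n" [c] = c := by
  simp [PySem.Str.join, PySem.Chars.join_singleton]

theorem pvJoin_cons (a b : String) (cs : List String) :
    PySem.Str.join "\n" (a :: b :: cs) = a ++ "\n" ++ PySem.Str.join "\n" (b :: cs) := by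
  rw [← String.toList_inj]
  simp [PySem.Str.join, PySem.Chars.join_cons_cons]

theorem pvJoin_concat (a : String) (cs : List String) (c : String) :
    PySem.Str.join "\n" (a :: (cs ++ [c])) = PySem.Str.join "\n" (a :: cs) ++ "\n" ++ c := by
  induction cs generalizing a with
  | nil => simp [pvJoin_cons, pvJoin_singleton]
  | cons b cs' ih =>
    simp only [List.cons_append]
    rw [pvJoin_cons a b (cs' ++ [c]), ih b, pvJoin_cons a b cs']
    rw [← String.toList_inj]
    simp

theorem pvBlocks_runs (ms : List (List (String × String))) (r : String) (a : String)
    (cs : List String) :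
    pvSpecBlocks r (PySem.Str.join "\n" (a :: cs)) ms =
      (pvSpecRuns r (a :: cs) ms).map (fun g => pvBlk g.1 (PySem.Str.join "\n" g.2)) := by
  induction ms generalizing r a cs with
  | nil => simp [pvSpecBlocks, pvSpecRuns]
  | cons m ms ih =>
    simp only [pvSpecBlocks, pvSpecRuns]
    by_cases h : pvRoleA m = r
    · rw [if_pos h, if_pos h]
      have h2 := ih r a (cs ++ [pvContentA m])
      rw [pvJoin_concat a cs (pvContentA m)] at h2
      simpa using h2
    · rw [if_neg h, if_neg h, List.map_cons]
      have h2 := ih (pvRoleA m) (pvContentA m) []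
      rw [pvJoin_singleton] at h2
      rw [h2]

theorem pvChain_spec (ms : List (List (String × String))) (r : String) (cs : List String)
    (prev : Option String) (h : prev ≠ some r) : pvChain prev (pvSpecRuns r cs ms) := by
  induction ms generalizing r cs prev with
  | nil => exact ⟨h, trivial⟩
  | cons m ms ih =>
    simp only [pvSpecRuns]
    by_cases hr : pvRoleA m = r
    · rw [if_pos hr]; exact ih r _ prev h
    · rw [if_neg hr]
      refine ⟨h, ih (pvRoleA m) _ (some r) ?_⟩
      intro e
      injection e with e'
      exact hr e'.symm

theorem pvEmit_fst (res : List (List (String × String))) (prev : Option String)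
    (r : String) (cs : List String) :
    pvEmit (res, prev) (r, cs) =
      ((if r = "assistant" ∧ (prev = none ∨ prev = some "system") then
          res ++ [[("role", "user"), ("content", "[Continued]")]]
        else res) ++ [[("role", r), ("content", PySem.Str.join "\n" cs)]], some r) := rfl

theorem pvStep2_blk (result : List (List (String × String))) (prev : Option String)
    (r c : String) (hL : pvLastOk result prev) (hne : prev ≠ some r) :
    pvStep2 result (pvBlk r c) =
      (if r = "assistant" ∧ (prev = none ∨ prev = some "system") then
          result ++ [[("role", "user"), ("content", "[Continued]")]]
        else result) ++ [[("role", r), ("content", c)]] := by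
  simp only [pvLastOk] at hL
  by_cases hs : r = "system"
  · subst hs; simp [pvStep2, pvBlk, pvGetA?]
  · by_cases ha : r = "assistant"
    · subst ha
      rcases hres : result.getLast? with _ | last
      · rw [hres] at hL
        simp only [Option.map_none] at hL
        simp [pvStep2, pvBlk, pvGetA?, hres, ← hL]
      · rw [hres] at hL
        simp only [Option.map_some] at hL
        by_cases hlr : (pvGetA? last "role").getD "" = "system"
        · simp [pvStep2, pvBlk, pvGetA?, hres, hlr, ← hL]
        · have hfa : (pvGetA? last "role").getD "" ≠ "assistant" := by
            intro e; apply hne; rw [← hL, e]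
          simp [pvStep2, pvBlk, pvGetA?, hres, hlr, hfa, ← hL]
    · by_cases hu : r = "user"
      · subst hu
        rcases hres : result.getLast? with _ | last
        · simp [pvStep2, pvBlk, pvGetA?, hres]
        · rw [hres] at hL
          simp only [Option.map_some] at hL
          have hfu : (pvGetA? last "role").getD "" ≠ "user" := by
            intro e; apply hne; rw [← hL, e]
          simp [pvStep2, pvBlk, pvGetA?, hres, hfu]
      · simp [pvStep2, pvBlk, pvGetA?, hs, ha, hu]

theorem pvEmit_spec (gs : List (String × List String))
    (result : List (List (String × String))) (prev : Option String)
    (hL : pvLastOk result prev) (hC : pvChain prev gs) :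
    List.foldl pvStep2 result (gs.map (fun g => pvBlk g.1 (PySem.Str.join "\n" g.2))) =
      (List.foldl pvEmit (result, prev) gs).1 := by
  induction gs generalizing result prev with
  | nil => simp
  | cons g gs ih =>
    obtain ⟨r, cs⟩ := g
    obtain ⟨hne, hC'⟩ := hC
    rw [List.map_cons, List.foldl_cons, List.foldl_cons,
      pvStep2_blk result prev r (PySem.Str.join "\n" cs) hL hne, pvEmit_fst]
    exact ih _ (some r) (by simp [pvLastOk, pvGetA?]) hC'

-- ===== VERDICT (by name: the statement is the Claim_ definition above) =====
theorem fix_message_alternation_spec : Claim_equal_fix_message_alternation := by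
  intro messages _
  unfold Spec_fix_message_alternation
  rcases messages with _ | ⟨m, ms⟩
  · rfl
  · show (List.foldl pvStep1 [] (m :: ms)).foldl pvStep2 []
        = ((pvRuns (m :: ms)).foldl pvEmit ([], none)).1
    have h1 : List.foldl pvStep1 [] (m :: ms) = pvSpecBlocks (pvRoleA m) (pvContentA m) ms := by
      rw [List.foldl_cons]
      have hstep : pvStep1 [] m = [] ++ [pvBlk (pvRoleA m) (pvContentA m)] := by
        simp [pvStep1, pvBlk]
      rw [hstep, pvPass1_spec]
      rfl
    have h2 := pvBlocks_runs ms (pvRoleA m) (pvContentA m) []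
    rw [pvJoin_singleton] at h2
    rw [h1, h2, pvRuns_cons]
    exact pvEmit_spec _ [] none rfl
      (pvChain_spec ms (pvRoleA m) _ none (by simp))
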